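-- pv_equiv track=rewrite | github.com/YuzFu/LINGUIST-409_Fall-2024 | nonneural_tur.py | halign
-- ===== SOURCE A (Python) =====
-- def hamming(s,t):
--     """
--     This function calculates the hamming distance between two strings.
--
--     Args:
--         s   string 1
--         t   string 2
--
--     Return:
--         value of hamming distance
--     """
--     return sum(1 for x,y in zip(s,t) if x != y)
--
-- def halign(s,t):
--     """
--     Align two strings by Hamming distance.
--
--     Args:
--         s   string 1
--         t   string 2
--
--     Return:
--         aligned version of the strings
--     """
--     slen = len(s)
--     tlen = len(t)
--     minscore = slen + tlen + 1
--
--     for upad in range(0, tlen+1):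
--         upper = '_' * upad + s + (tlen - upad) * '_'
--         lower = slen * '_' + t
--         score = hamming(upper, lower)
--         if score < minscore:
--             bu = upper
--             bl = lower
--             minscore = score
--
--     for lpad in range(0, slen+1):
--         upper = tlen * '_' + s
--         lower = (slen - lpad) * '_' + t + '_' * lpad
--         score = hamming(upper, lower)
--         if score < minscore:
--             bu = upper
--             bl = lower
--             minscore = score
--
--     zipped = list(zip(bu,bl))
--     newin  = ''.join(i for i,o in zipped if i != '_' or o != '_')
--     newout = ''.join(o for i,o in zipped if i != '_' or o != '_')
--     return newin, newout
-- ===== SOURCE B (Python) =====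
-- def halign(s, t):
--     slen, tlen = len(s), len(t)
--     # prefix counts of non-'_' characters
--     ps = [0]
--     for c in s:
--         ps.append(ps[-1] + (c != '_'))
--     pt = [0]
--     for c in t:
--         pt.append(pt[-1] + (c != '_'))
--
--     def score(i0, j0):
--         # Hamming score of the overlay where t[j0] sits under s[i0]:
--         # non-'_' chars outside the overlap each cost 1, mismatches inside cost 1.
--         ov = min(slen - i0, tlen - j0)
--         mism = sum(1 for x, y in zip(s[i0:i0 + ov], t[j0:j0 + ov]) if x != y)
--         return ps[i0] + pt[j0] + mism + (ps[slen] - ps[i0 + ov]) + (pt[tlen] - pt[j0 + ov])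
--
--     best = None
--     for upad in range(tlen + 1):
--         sc = score(max(0, slen - upad), max(0, upad - slen))
--         if best is None or sc < best[0]:
--             best = (sc, 0, upad)
--     for lpad in range(slen + 1):
--         k = tlen + lpad
--         sc = score(max(0, slen - k), max(0, k - slen))
--         if sc < best[0]:
--             best = (sc, 1, lpad)
--
--     _, which, pad = best
--     if which == 0:
--         upper = '_' * pad + s + '_' * (tlen - pad)
--         lower = '_' * slen + t
--     else:
--         upper = '_' * tlen + s
--         lower = '_' * (slen - pad) + t + '_' * pad
--     pairs = [(x, y) for x, y in zip(upper, lower) if x != '_' or y != '_']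
--     return ''.join(x for x, _ in pairs), ''.join(y for _, y in pairs)
-- ===== Notes on version B (the rewrite author's own statement) =====
-- stated objective: faster
-- what changed: Instead of building two full-length padded strings and scanning their whole length for every padding, B precomputes prefix sums of non-'_' characters and scores each shift as prefix/suffix counts plus a mismatch count over the overlap only, constructing the winning alignment strings once at the end.
import Mathlib
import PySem

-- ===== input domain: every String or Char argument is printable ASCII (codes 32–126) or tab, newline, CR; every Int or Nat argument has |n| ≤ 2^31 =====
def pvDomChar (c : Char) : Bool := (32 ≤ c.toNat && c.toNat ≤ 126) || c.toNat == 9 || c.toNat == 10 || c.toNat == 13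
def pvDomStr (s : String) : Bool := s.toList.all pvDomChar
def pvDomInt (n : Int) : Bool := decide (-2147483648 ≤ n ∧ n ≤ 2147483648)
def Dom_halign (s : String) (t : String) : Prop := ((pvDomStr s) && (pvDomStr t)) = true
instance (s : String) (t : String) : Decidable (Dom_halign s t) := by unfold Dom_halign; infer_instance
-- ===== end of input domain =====

-- B replaces A's per-padding construction of two full-length padded strings and a full-length
-- Hamming scan by prefix sums of non-'_' characters plus a mismatch count over the overlap only,
-- building the winning alignment once at the end.

-- ===== PORT A =====
-- sum(1 for x,y in zip(s,t) if x != y)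
def pvHamming (s : List Char) (t : List Char) : Nat :=
  (s.zip t).countP (fun p => p.1 != p.2)

-- '_' * n
def pvRep (n : Nat) : List Char := List.replicate n '_'

-- body of A's first for-loop (state: bu, bl, minscore); pads are Nats from range, so
-- Python's tlen - upad ≥ 0 coincides with Nat subtraction
def halignStep1 (sl tl : List Char) (st : List Char × List Char × Nat) (upad : Nat) :
    List Char × List Char × Nat :=
  let upper := pvRep upad ++ sl ++ pvRep (tl.length - upad)
  let lower := pvRep sl.length ++ tl
  let score := pvHamming upper lower
  if score < st.2.2 then (upper, lower, score) else st

-- body of A's second for-loop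
def halignStep2 (sl tl : List Char) (st : List Char × List Char × Nat) (lpad : Nat) :
    List Char × List Char × Nat :=
  let upper := pvRep tl.length ++ sl
  let lower := pvRep (sl.length - lpad) ++ tl ++ pvRep lpad
  let score := pvHamming upper lower
  if score < st.2.2 then (upper, lower, score) else st

-- bu/bl start as [] (Python leaves them unbound; the first iteration always sets them)
def halign (s : String) (t : String) : String × String :=
  let sl := s.toList
  let tl := t.toList
  let st1 := (List.range (tl.length + 1)).foldl (halignStep1 sl tl)
      ([], [], sl.length + tl.length + 1)
  let st2 := (List.range (sl.length + 1)).foldl (halignStep2 sl tl) st1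
  let kept := (st2.1.zip st2.2.1).filter (fun p => p.1 != '_' || p.2 != '_')
  (String.ofList (kept.map Prod.fst), String.ofList (kept.map Prod.snd))

-- ===== PORT B =====
-- ps = [0]; for c in s: ps.append(ps[-1] + (c != '_'))
def pvPrefix (l : List Char) : List Nat :=
  l.scanl (fun a c => a + (if c != '_' then 1 else 0)) 0

-- B's score(i0, j0); ov = min(slen - i0, tlen - j0) is written out at each use; the
-- list accesses ps[k] are always in range here, rendered with getD
def pvScoreB (sl tl : List Char) (ps pt : List Nat) (i0 j0 : Nat) : Nat :=
  ps.getD i0 0 + pt.getD j0 0 +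
    (((PySem.List.slice sl (some (i0 : Int))
        (some ((i0 : Int) + ((min (sl.length - i0) (tl.length - j0) : Nat) : Int)))).zip
      (PySem.List.slice tl (some (j0 : Int))
        (some ((j0 : Int) + ((min (sl.length - i0) (tl.length - j0) : Nat) : Int))))).countP
      (fun p => p.1 != p.2)) +
    (ps.getD sl.length 0 - ps.getD (i0 + min (sl.length - i0) (tl.length - j0)) 0) +
    (pt.getD tl.length 0 - pt.getD (j0 + min (sl.length - i0) (tl.length - j0)) 0)

-- body of B's first loop; Python's max(0, slen - upad) is Nat subtraction
def altStep1 (sl tl : List Char) (ps pt : List Nat) (best : Option (Nat × Nat × Nat))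
    (upad : Nat) : Option (Nat × Nat × Nat) :=
  let sc := pvScoreB sl tl ps pt (sl.length - upad) (upad - sl.length)
  match best with
  | none => some (sc, 0, upad)
  | some b => if sc < b.1 then some (sc, 0, upad) else best

-- body of B's second loop (best is never None there: loop 1 always runs at least once)
def altStep2 (sl tl : List Char) (ps pt : List Nat) (best : Option (Nat × Nat × Nat))
    (lpad : Nat) : Option (Nat × Nat × Nat) :=
  let sc := pvScoreB sl tl ps pt (sl.length - (tl.length + lpad)) ((tl.length + lpad) - sl.length)
  match best with
  | none => some (sc, 1, lpad)
  | some b => if sc < b.1 then some (sc, 1, lpad) else best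

def halign_alt (s : String) (t : String) : String × String :=
  let sl := s.toList
  let tl := t.toList
  let ps := pvPrefix sl
  let pt := pvPrefix tl
  let best1 := (List.range (tl.length + 1)).foldl (altStep1 sl tl ps pt) none
  let best := (List.range (sl.length + 1)).foldl (altStep2 sl tl ps pt) best1
  match best with
  | none => ("", "")  -- unreachable: the first range is nonempty, so best is always set
  | some (_, which, pad) =>
    let ul := if which = 0 then
        (pvRep pad ++ sl ++ pvRep (tl.length - pad), pvRep sl.length ++ tl)
      else (pvRep tl.length ++ sl, pvRep (sl.length - pad) ++ tl ++ pvRep pad)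
    let kept := (ul.1.zip ul.2).filter (fun p => p.1 != '_' || p.2 != '_')
    (String.ofList (kept.map Prod.fst), String.ofList (kept.map Prod.snd))

-- ===== PRECONDITION & SPEC =====
def Spec_halign (s : String) (t : String) (out : String × String) : Prop := out = halign_alt s t
instance (s : String) (t : String) (out : String × String) : Decidable (Spec_halign s t out) := by unfold Spec_halign; infer_instance

-- ===== CLAIM (what is proved, stated in full; the proofs are below) =====
def Claim_equal_halign : Prop := ∀ (s : String) (t : String), Dom_halign s t → Spec_halign s t (halign s t)

-- ===== LEMMAS AND PROOFS =====

-- number of non-'_' characters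
def pvNonU (l : List Char) : Nat := l.countP (fun c => c != '_')

lemma ham_append (u1 u2 l1 l2 : List Char) (h : u1.length = l1.length) :
    pvHamming (u1 ++ u2) (l1 ++ l2) = pvHamming u1 l1 + pvHamming u2 l2 := by
  unfold pvHamming
  rw [List.zip_append h, List.countP_append]

lemma ham_rep_left (xs : List Char) : pvHamming (pvRep xs.length) xs = pvNonU xs := by
  induction xs with
  | nil => rfl
  | cons x xs ih =>
    simp only [pvRep, pvHamming, pvNonU, List.length_cons, List.replicate_succ,
      List.zip_cons_cons, List.countP_cons] at *
    rw [bne_comm, ih]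

lemma ham_rep_right (xs : List Char) : pvHamming xs (pvRep xs.length) = pvNonU xs := by
  induction xs with
  | nil => rfl
  | cons x xs ih =>
    simp only [pvRep, pvHamming, pvNonU, List.length_cons, List.replicate_succ,
      List.zip_cons_cons, List.countP_cons] at *
    rw [ih]

lemma ham_rep_rep (n : Nat) : pvHamming (pvRep n) (pvRep n) = 0 := by
  simp [pvHamming, pvRep, List.zip_replicate', List.countP_eq_zero]

lemma ham_swap (u l : List Char) : pvHamming u l = pvHamming l u := by
  unfold pvHamming
  rw [← List.zip_swap u l, List.countP_map]
  apply List.countP_congr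
  intro p _
  simp [Function.comp, bne_iff_ne, ne_comm]

lemma countP_take_drop (p : Char → Bool) (k : Nat) (l : List Char) :
    l.countP p = (l.take k).countP p + (l.drop k).countP p := by
  conv_lhs => rw [← List.take_append_drop k l]
  rw [List.countP_append]

lemma ham_le (u l : List Char) : pvHamming u l ≤ min u.length l.length := by
  calc pvHamming u l ≤ (u.zip l).length := List.countP_le_length
    _ = min u.length l.length := List.length_zip

-- prefix-sum characterisation: ps[k] counts the non-'_' chars among the first k
lemma prefix_getD_aux : ∀ (l : List Char) (a k : Nat), k ≤ l.length →
    ((l.scanl (fun a c => a + (if c != '_' then 1 else 0)) a).getD k 0) =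
      a + pvNonU (l.take k) := by
  intro l
  induction l with
  | nil =>
    intro a k hk
    have : k = 0 := by simpa using hk
    subst this
    simp [List.scanl_nil, pvNonU]
  | cons c l ih =>
    intro a k hk
    cases k with
    | zero => simp [List.scanl_cons, pvNonU]
    | succ k =>
      rw [List.scanl_cons, List.getD_cons_succ, ih _ k (by simpa using hk)]
      simp only [List.take_succ_cons, pvNonU, List.countP_cons]
      split_ifs <;> omega

lemma prefix_getD (l : List Char) (k : Nat) (hk : k ≤ l.length) :
    (pvPrefix l).getD k 0 = pvNonU (l.take k) := by
  unfold pvPrefix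
  rw [prefix_getD_aux l 0 k hk, Nat.zero_add]

lemma prefix_getD_len (l : List Char) : (pvPrefix l).getD l.length 0 = pvNonU l := by
  rw [prefix_getD l l.length le_rfl, List.take_length]

-- the candidate score when t is placed (c - a) positions into s (case a ≤ c)
lemma score_le_case (sl tl : List Char) (a b c d : Nat) (hac : a ≤ c)
    (hi : c - a ≤ sl.length) (hlen : a + sl.length + b = c + tl.length + d) :
    pvHamming (pvRep a ++ sl ++ pvRep b) (pvRep c ++ tl ++ pvRep d) =
      pvScoreB sl tl (pvPrefix sl) (pvPrefix tl) (c - a) 0 := by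
  set i0 := c - a with hi0
  have hc : c = a + i0 := by omega
  set r := sl.length - i0 with hr
  have e1 : pvRep c = pvRep a ++ pvRep i0 := by
    rw [hc]; unfold pvRep; rw [List.replicate_add]
  have hlt : (sl.take i0).length = (pvRep i0).length := by
    simp [pvRep, List.length_take]; omega
  have e2 : pvRep i0 = pvRep (sl.take i0).length := by
    unfold pvRep; congr 1; simp [List.length_take]; omega
  have step1 :
      pvHamming (pvRep a ++ sl ++ pvRep b) (pvRep c ++ tl ++ pvRep d) =
        pvNonU (sl.take i0) + pvHamming (sl.drop i0 ++ pvRep b) (tl ++ pvRep d) := by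
    have eU : pvRep a ++ (sl.take i0 ++ (sl.drop i0 ++ pvRep b))
        = pvRep a ++ sl ++ pvRep b := by
      rw [← List.append_assoc (sl.take i0), List.take_append_drop, ← List.append_assoc]
    have eL : pvRep c ++ tl ++ pvRep d = pvRep a ++ (pvRep i0 ++ (tl ++ pvRep d)) := by
      rw [e1]; simp [List.append_assoc]
    rw [← eU, eL, ham_append _ _ _ _ (by simp [pvRep]), ham_append _ _ _ _ hlt,
      ham_rep_rep, e2, ham_rep_right]
    omega
  rw [step1]
  unfold pvScoreB
  rw [prefix_getD sl i0 hi, prefix_getD tl 0 (by omega)]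
  simp only [List.take_zero, Nat.sub_zero, Nat.zero_add]
  by_cases hcase : r ≤ tl.length
  · -- overlap runs to the end of s
    rw [show min (sl.length - i0) tl.length = r from by omega]
    rw [PySem.List.slice_natCast_add sl i0 r, PySem.List.slice_natCast_add tl 0 r]
    rw [List.drop_zero, show (sl.drop i0).take r = sl.drop i0 from
      List.take_of_length_le (by simp [List.length_drop]; omega)]
    rw [show i0 + r = sl.length from by omega]
    rw [prefix_getD_len sl, prefix_getD_len tl, prefix_getD tl r (by omega)]
    have hb : b = (tl.length - r) + d := by omega
    have splitlow : tl ++ pvRep d = tl.take r ++ (tl.drop r ++ pvRep d) := by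
      rw [← List.append_assoc, List.take_append_drop]
    have step2 : pvHamming (sl.drop i0 ++ pvRep b) (tl ++ pvRep d) =
        pvHamming (sl.drop i0) (tl.take r) + pvNonU (tl.drop r) := by
      rw [splitlow, ham_append _ _ _ _ (by simp [List.length_take, List.length_drop]; omega)]
      have e3 : pvRep b = pvRep (tl.length - r) ++ pvRep d := by
        rw [hb]; unfold pvRep; rw [List.replicate_add]
      rw [e3, ham_append _ _ _ _ (by simp [pvRep, List.length_drop])]
      have e4 : pvRep (tl.length - r) = pvRep (tl.drop r).length := by
        simp [List.length_drop]
      rw [e4, ham_rep_left, ham_rep_rep]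
      omega
    rw [step2]
    have h1 : pvNonU tl = pvNonU (tl.take r) + pvNonU (tl.drop r) :=
      countP_take_drop _ r tl
    have hnil : pvNonU ([] : List Char) = 0 := rfl
    unfold pvHamming pvNonU at *
    omega
  · -- overlap runs to the end of t
    have hrt : tl.length < r := by omega
    rw [show min (sl.length - i0) tl.length = tl.length from by omega]
    rw [PySem.List.slice_natCast_add sl i0 tl.length,
      PySem.List.slice_natCast_add tl 0 tl.length]
    rw [List.drop_zero, List.take_length]
    rw [prefix_getD_len sl, prefix_getD_len tl,
      prefix_getD sl (i0 + tl.length) (by omega)]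
    have hd : d = (r - tl.length) + b := by omega
    have splitup : sl.drop i0 ++ pvRep b =
        (sl.drop i0).take tl.length ++ (sl.drop (i0 + tl.length) ++ pvRep b) := by
      rw [← List.append_assoc]
      congr 1
      rw [← List.drop_drop]
      exact (List.take_append_drop tl.length (sl.drop i0)).symm
    have step2 : pvHamming (sl.drop i0 ++ pvRep b) (tl ++ pvRep d) =
        pvHamming ((sl.drop i0).take tl.length) tl + pvNonU (sl.drop (i0 + tl.length)) := by
      rw [splitup, ham_append _ _ _ _ (by simp [List.length_take, List.length_drop]; omega)]
      have e3 : pvRep d = pvRep (r - tl.length) ++ pvRep b := by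
        rw [hd]; unfold pvRep; rw [List.replicate_add]
      rw [e3, ham_append _ _ _ _ (by simp [pvRep, List.length_drop]; omega)]
      have e4 : pvRep (r - tl.length) = pvRep (sl.drop (i0 + tl.length)).length := by
        unfold pvRep; congr 1; simp [List.length_drop]; omega
      rw [e4, ham_rep_right, ham_rep_rep]
      omega
    rw [step2]
    have h1 : pvNonU sl = pvNonU (sl.take (i0 + tl.length)) + pvNonU (sl.drop (i0 + tl.length)) :=
      countP_take_drop _ (i0 + tl.length) sl
    have hnil : pvNonU ([] : List Char) = 0 := rfl
    unfold pvHamming pvNonU at *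
    omega

-- symmetry of B's score in the two strings
lemma scoreB_comm (sl tl : List Char) (i j : Nat) :
    pvScoreB tl sl (pvPrefix tl) (pvPrefix sl) j i =
      pvScoreB sl tl (pvPrefix sl) (pvPrefix tl) i j := by
  unfold pvScoreB
  rw [Nat.min_comm (tl.length - j) (sl.length - i)]
  have hsw := ham_swap
    (PySem.List.slice tl (some (j : Int))
      (some ((j : Int) + ((min (sl.length - i) (tl.length - j) : Nat) : Int))))
    (PySem.List.slice sl (some (i : Int))
      (some ((i : Int) + ((min (sl.length - i) (tl.length - j) : Nat) : Int))))
  unfold pvHamming at hsw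
  rw [hsw]
  omega

-- general form: candidate with paddings a,b around s and c,d around t
lemma score_eq (sl tl : List Char) (a b c d : Nat)
    (h1 : c - a ≤ sl.length) (h2 : a - c ≤ tl.length)
    (hlen : a + sl.length + b = c + tl.length + d) :
    pvHamming (pvRep a ++ sl ++ pvRep b) (pvRep c ++ tl ++ pvRep d) =
      pvScoreB sl tl (pvPrefix sl) (pvPrefix tl) (c - a) (a - c) := by
  by_cases h : a ≤ c
  · rw [show a - c = 0 from by omega]
    exact score_le_case sl tl a b c d h h1 hlen
  · rw [ham_swap, show c - a = 0 from by omega, ← scoreB_comm]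
    exact score_le_case tl sl c d a b (by omega) h2 (by omega)

-- loop 1: A's score of the padded strings is B's overlap score
lemma scoreA1_eq (sl tl : List Char) (upad : Nat) (h : upad ≤ tl.length) :
    pvHamming (pvRep upad ++ sl ++ pvRep (tl.length - upad)) (pvRep sl.length ++ tl) =
      pvScoreB sl tl (pvPrefix sl) (pvPrefix tl) (sl.length - upad) (upad - sl.length) := by
  have := score_eq sl tl upad (tl.length - upad) sl.length 0 (by omega) (by omega) (by omega)
  rw [show pvRep sl.length ++ tl ++ pvRep 0 = pvRep sl.length ++ tl from by
    simp [pvRep]] at this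
  exact this

-- loop 2
lemma scoreA2_eq (sl tl : List Char) (lpad : Nat) (h : lpad ≤ sl.length) :
    pvHamming (pvRep tl.length ++ sl) (pvRep (sl.length - lpad) ++ tl ++ pvRep lpad) =
      pvScoreB sl tl (pvPrefix sl) (pvPrefix tl) (sl.length - (tl.length + lpad))
        ((tl.length + lpad) - sl.length) := by
  have := score_eq sl tl tl.length 0 (sl.length - lpad) lpad (by omega) (by omega) (by omega)
  rw [show pvRep tl.length ++ sl ++ pvRep 0 = pvRep tl.length ++ sl from by
    simp [pvRep]] at this
  rw [this, show sl.length - lpad - tl.length = sl.length - (tl.length + lpad) from by omega,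
    show tl.length - (sl.length - lpad) = (tl.length + lpad) - sl.length from by omega]

-- candidate scores are at most slen + tlen (so they beat A's initial minscore)
lemma cap1 (sl tl : List Char) (upad : Nat) (h : upad ≤ tl.length) :
    pvHamming (pvRep upad ++ sl ++ pvRep (tl.length - upad)) (pvRep sl.length ++ tl) ≤
      sl.length + tl.length := by
  have h := ham_le (pvRep upad ++ sl ++ pvRep (tl.length - upad)) (pvRep sl.length ++ tl)
  have hU : (pvRep upad ++ sl ++ pvRep (tl.length - upad)).length
      = upad + sl.length + (tl.length - upad) := by simp [pvRep]; omega
  have hL : (pvRep sl.length ++ tl).length = sl.length + tl.length := by simp [pvRep]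
  rw [hU, hL] at h
  omega

-- the winning candidate as a function of B's (which, pad) tag
def pvRender (sl tl : List Char) (w p : Nat) : List Char × List Char :=
  if w = 0 then (pvRep p ++ sl ++ pvRep (tl.length - p), pvRep sl.length ++ tl)
  else (pvRep tl.length ++ sl, pvRep (sl.length - p) ++ tl ++ pvRep p)

-- simulation invariant: A's state is the rendering of B's state
def pvInvS (sl tl : List Char) (st : List Char × List Char × Nat)
    (ob : Option (Nat × Nat × Nat)) : Prop :=
  ∃ sc w p, ob = some (sc, w, p) ∧
    st = ((pvRender sl tl w p).1, (pvRender sl tl w p).2, sc)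

def pvInv (sl tl : List Char) (st : List Char × List Char × Nat)
    (ob : Option (Nat × Nat × Nat)) : Prop :=
  (ob = none ∧ st = ([], [], sl.length + tl.length + 1)) ∨ pvInvS sl tl st ob

lemma step1_inv (sl tl : List Char) (x : Nat) (hx : x ≤ tl.length)
    (st : List Char × List Char × Nat) (ob : Option (Nat × Nat × Nat))
    (h : pvInv sl tl st ob) :
    pvInv sl tl (halignStep1 sl tl st x)
      (altStep1 sl tl (pvPrefix sl) (pvPrefix tl) ob x) := by
  unfold halignStep1 altStep1
  dsimp only
  rcases h with ⟨hob, hst⟩ | ⟨sc, w, p, hob, hst⟩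
  · subst hob; subst hst
    dsimp only
    right
    refine ⟨pvScoreB sl tl (pvPrefix sl) (pvPrefix tl) (sl.length - x) (x - sl.length),
      0, x, rfl, ?_⟩
    rw [if_pos (show pvHamming (pvRep x ++ sl ++ pvRep (tl.length - x))
        (pvRep sl.length ++ tl) < sl.length + tl.length + 1 from by
      have := cap1 sl tl x hx; omega)]
    rw [show (pvRender sl tl 0 x).1 = pvRep x ++ sl ++ pvRep (tl.length - x) from rfl,
      show (pvRender sl tl 0 x).2 = pvRep sl.length ++ tl from rfl,
      scoreA1_eq sl tl x hx]
  · subst hob; subst hst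
    dsimp only
    rw [← scoreA1_eq sl tl x hx]
    by_cases hlt :
      pvHamming (pvRep x ++ sl ++ pvRep (tl.length - x)) (pvRep sl.length ++ tl) < sc
    · rw [if_pos hlt, if_pos hlt]
      right
      refine ⟨_, 0, x, rfl, ?_⟩
      rw [show (pvRender sl tl 0 x).1 = pvRep x ++ sl ++ pvRep (tl.length - x) from rfl,
        show (pvRender sl tl 0 x).2 = pvRep sl.length ++ tl from rfl]
    · rw [if_neg hlt, if_neg hlt]
      right
      exact ⟨sc, w, p, rfl, rfl⟩

lemma step2_inv (sl tl : List Char) (x : Nat) (hx : x ≤ sl.length)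
    (st : List Char × List Char × Nat) (ob : Option (Nat × Nat × Nat))
    (h : pvInvS sl tl st ob) :
    pvInvS sl tl (halignStep2 sl tl st x)
      (altStep2 sl tl (pvPrefix sl) (pvPrefix tl) ob x) := by
  unfold halignStep2 altStep2
  dsimp only
  obtain ⟨sc, w, p, hob, hst⟩ := h
  subst hob; subst hst
  dsimp only
  rw [← scoreA2_eq sl tl x hx]
  by_cases hlt :
    pvHamming (pvRep tl.length ++ sl) (pvRep (sl.length - x) ++ tl ++ pvRep x) < sc
  · rw [if_pos hlt, if_pos hlt]
    refine ⟨_, 1, x, rfl, ?_⟩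
    rw [show (pvRender sl tl 1 x).1 = pvRep tl.length ++ sl from rfl,
      show (pvRender sl tl 1 x).2 = pvRep (sl.length - x) ++ tl ++ pvRep x from rfl]
  · rw [if_neg hlt, if_neg hlt]
    exact ⟨sc, w, p, rfl, rfl⟩

lemma fold1_inv (sl tl : List Char) :
    ∀ (L : List Nat), (∀ x ∈ L, x ≤ tl.length) →
    ∀ st ob, pvInv sl tl st ob →
    pvInv sl tl (L.foldl (halignStep1 sl tl) st)
      (L.foldl (altStep1 sl tl (pvPrefix sl) (pvPrefix tl)) ob) := by
  intro L
  induction L with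
  | nil => intro _ st ob h; exact h
  | cons x L ih =>
    intro hb st ob h
    simp only [List.foldl_cons]
    exact ih (fun y hy => hb y (List.mem_cons_of_mem x hy)) _ _
      (step1_inv sl tl x (hb x List.mem_cons_self) st ob h)

lemma fold2_inv (sl tl : List Char) :
    ∀ (L : List Nat), (∀ x ∈ L, x ≤ sl.length) →
    ∀ st ob, pvInvS sl tl st ob →
    pvInvS sl tl (L.foldl (halignStep2 sl tl) st)
      (L.foldl (altStep2 sl tl (pvPrefix sl) (pvPrefix tl)) ob) := by
  intro L
  induction L with
  | nil => intro _ st ob h; exact h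
  | cons x L ih =>
    intro hb st ob h
    simp only [List.foldl_cons]
    exact ih (fun y hy => hb y (List.mem_cons_of_mem x hy)) _ _
      (step2_inv sl tl x (hb x List.mem_cons_self) st ob h)

lemma alt1_isSome (sl tl : List Char) (ps pt : List Nat) (ob : Option (Nat × Nat × Nat))
    (x : Nat) : (altStep1 sl tl ps pt ob x).isSome := by
  unfold altStep1
  cases ob with
  | none => rfl
  | some b => dsimp only; split <;> rfl

lemma fold1_isSome (sl tl : List Char) (ps pt : List Nat) :
    ∀ (L : List Nat) (ob : Option (Nat × Nat × Nat)), ob.isSome →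
      (L.foldl (altStep1 sl tl ps pt) ob).isSome := by
  intro L
  induction L with
  | nil => intro ob h; exact h
  | cons x L ih =>
    intro ob h
    simp only [List.foldl_cons]
    exact ih _ (alt1_isSome sl tl ps pt ob x)

lemma halign_eq (s t : String) : halign s t = halign_alt s t := by
  unfold halign halign_alt
  dsimp only
  have hinv1 := fold1_inv s.toList t.toList (List.range (t.toList.length + 1))
    (by intro x hx; exact Nat.lt_succ_iff.mp (List.mem_range.mp hx))
    ([], [], s.toList.length + t.toList.length + 1) none (Or.inl ⟨rfl, rfl⟩)
  have hsome : ((List.range (t.toList.length + 1)).foldl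
      (altStep1 s.toList t.toList (pvPrefix s.toList) (pvPrefix t.toList)) none).isSome := by
    rw [List.range_succ_eq_map, List.foldl_cons]
    exact fold1_isSome _ _ _ _ _ _ (alt1_isSome _ _ _ _ none 0)
  have hinv1S : pvInvS s.toList t.toList
      (List.foldl (halignStep1 s.toList t.toList)
        ([], [], s.toList.length + t.toList.length + 1) (List.range (t.toList.length + 1)))
      (List.foldl (altStep1 s.toList t.toList (pvPrefix s.toList) (pvPrefix t.toList)) none
        (List.range (t.toList.length + 1))) := by
    rcases hinv1 with ⟨hob, _⟩ | h
    · rw [hob] at hsome; simp at hsome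
    · exact h
  have hinv2 := fold2_inv s.toList t.toList (List.range (s.toList.length + 1))
    (by intro x hx; exact Nat.lt_succ_iff.mp (List.mem_range.mp hx)) _ _ hinv1S
  obtain ⟨sc, w, p, hob, hst⟩ := hinv2
  rw [hob, hst]
  dsimp only
  unfold pvRender
  by_cases hw : w = 0 <;> simp [hw]

-- ===== VERDICT (by name: the statement is the Claim_ definition above) =====
theorem halign_spec : Claim_equal_halign := by
  intro s t _
  show halign s t = halign_alt s t
  exact halign_eq s t
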